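-- pv_equiv track=rewrite | github.com/wnsgml7267/cote-practice | 백준/Bronze/23810. 골뱅이 찍기 － 뒤집힌 ㅋ/골뱅이 찍기 － 뒤집힌 ㅋ.py | Solution
-- ===== SOURCE A (Python) =====
-- def Solution(N):
--     answer = ['' for _ in range(N * 5)]
--
--     for idx in range(N*5):
--         if idx < N or (2 * N - 1 < idx < 2 * N + N):
--             answer[idx] = "@" * (N * 5)
--         else:
--             answer[idx] = "@" * N
--
--     return "\n".join(answer)
-- ===== SOURCE B (Python) =====
-- def Solution(N):
--     full = ("@" * (5 * N) + "\n") * N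
--     short = ("@" * N + "\n") * N
--     return (full + short + full + short + short)[:-1]
-- ===== Notes on version B (the rewrite author's own statement) =====
-- stated objective: simpler
-- what changed: B never builds a list of rows at all: it builds two newline-terminated text blocks by string repetition, concatenates five blocks and slices off the trailing newline, replacing A's indexed row array, per-index branch loop and join.
import Mathlib
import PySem

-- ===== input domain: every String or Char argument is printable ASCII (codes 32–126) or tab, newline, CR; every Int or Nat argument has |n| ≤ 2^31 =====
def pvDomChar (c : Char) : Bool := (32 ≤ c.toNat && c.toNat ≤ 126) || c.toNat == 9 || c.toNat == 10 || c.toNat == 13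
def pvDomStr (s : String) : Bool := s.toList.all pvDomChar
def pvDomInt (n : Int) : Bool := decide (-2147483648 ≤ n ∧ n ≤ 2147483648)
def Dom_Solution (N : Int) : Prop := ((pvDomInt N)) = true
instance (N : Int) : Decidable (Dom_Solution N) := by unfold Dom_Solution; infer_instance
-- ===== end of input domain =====

-- B builds no row list: two newline-terminated text blocks are composed by string repetition
-- and the trailing newline is sliced off, replacing A's row array, per-index branch and join (simpler).

-- ===== PORT A =====
def Solution (N : Int) : String :=
  let answer := (PySem.List.pyRange 0 (N * 5) 1).map (fun _ => "")
  let answer := (PySem.List.pyRange 0 (N * 5) 1).foldl (fun acc idx =>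
    if idx < N ∨ (2 * N - 1 < idx ∧ idx < 2 * N + N) then
      acc.set idx.toNat (String.ofList (PySem.List.pyRepeat ['@'] (N * 5)))
    else
      acc.set idx.toNat (String.ofList (PySem.List.pyRepeat ['@'] N))) answer
  PySem.Str.join "\n" answer

-- ===== PORT B =====
def Solution_alt (N : Int) : String :=
  let full := PySem.List.pyRepeat (PySem.List.pyRepeat ['@'] (5 * N) ++ ['\n']) N
  let short := PySem.List.pyRepeat (PySem.List.pyRepeat ['@'] N ++ ['\n']) N
  String.ofList (PySem.List.slice (full ++ short ++ full ++ short ++ short) none (some (-1)))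

-- ===== PRECONDITION & SPEC =====
def Spec_Solution (N : Int) (out : String) : Prop := out = Solution_alt N
instance (N : Int) (out : String) : Decidable (Spec_Solution N out) := by unfold Spec_Solution; infer_instance

-- ===== CLAIM (what is proved, stated in full; the proofs are below) =====
def Claim_equal_Solution : Prop := ∀ (N : Int), Dom_Solution N → Spec_Solution N (Solution N)

-- ===== LEMMAS AND PROOFS =====

lemma foldl_set_range {α : Type} (f : Nat → α) :
    ∀ (m : Nat) (l : List α), m ≤ l.length →
      (List.range m).foldl (fun acc i => acc.set i (f i)) l = (List.range m).map f ++ l.drop m := by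
  intro m
  induction m with
  | zero => simp
  | succ m ih =>
    intro l h
    rw [List.range_succ, List.foldl_append, ih l (by omega)]
    simp only [List.foldl_cons, List.foldl_nil, List.map_append, List.map_cons, List.map_nil]
    rw [List.set_append_right _ _ (by simp)]
    have hd : l.drop m = l[m] :: l.drop (m + 1) := List.drop_eq_getElem_cons (by omega)
    simp only [List.length_map, List.length_range, Nat.sub_self]
    rw [hd, List.set_cons_zero, List.append_assoc]
    rfl

lemma map_range_blocks {α : Type} (N : Int) (hN : 0 < N) (full short : α) :
    (List.range (5 * N.toNat)).map
        (fun (k : Nat) => if ((k : Int) < N ∨ (2 * N - 1 < (k : Int) ∧ (k : Int) < 2 * N + N)) then full else short)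
      = List.replicate N.toNat full ++ List.replicate N.toNat short
        ++ List.replicate N.toNat full ++ List.replicate (2 * N.toNat) short := by
  set n := N.toNat with hn
  have hNn : (n : Int) = N := Int.toNat_of_nonneg (by omega)
  apply List.ext_getElem
  · simp; omega
  intro i h1 h2'
  simp only [List.length_map, List.length_range] at h1
  simp only [List.getElem_map, List.getElem_range, List.getElem_append, List.getElem_replicate,
    List.length_append, List.length_replicate]
  split_ifs <;> first | rfl | (exfalso; omega)

-- '\n'.join(rows) over char lists is: append '\n' to every row, flatten, drop the final '\n'.
lemma join_newline_eq (rows : List (List Char)) :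
    PySem.Chars.join ['\n'] rows = (rows.map (· ++ ['\n'])).flatten.dropLast := by
  induction rows with
  | nil => simp [PySem.Chars.join_nil]
  | cons p rest ih =>
    cases rest with
    | nil => simp [PySem.Chars.join_singleton]
    | cons q rest' =>
      have hne : (List.map (fun x => x ++ ['\n']) (q :: rest')).flatten ≠ [] := by simp
      rw [PySem.Chars.join_cons_cons, List.map_cons, List.flatten_cons,
        List.dropLast_append_of_ne_nil hne, ih, List.append_assoc]

-- ===== VERDICT (by name: the statement is the Claim_ definition above) =====
theorem Solution_spec : Claim_equal_Solution := by
  intro N _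
  unfold Spec_Solution Solution Solution_alt
  by_cases hN : N ≤ 0
  · rw [PySem.List.pyRange_one_eq_nil (by omega)]
    simp [PySem.List.pyRepeat, Int.toNat_of_nonpos hN]
    rfl
  · rw [not_le] at hN
    dsimp only
    rw [PySem.List.pyRange_one]
    have h0 : ((N * 5 : Int) - 0).toNat = 5 * N.toNat := by omega
    rw [h0, List.foldl_map, List.map_map]
    simp only [zero_add, Int.toNat_natCast]
    rw [PySem.List.foldl_congr_mem _ _ (fun (acc : List String) (k : Nat) =>
          acc.set k (if ((k : Int) < N ∨ (2 * N - 1 < (k : Int) ∧ (k : Int) < 2 * N + N))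
            then String.ofList (PySem.List.pyRepeat ['@'] (N * 5))
            else String.ofList (PySem.List.pyRepeat ['@'] N))) _
        (by intro acc x hx; dsimp only; split_ifs <;> rfl)]
    rw [foldl_set_range _ (5 * N.toNat) _ (by simp)]
    rw [List.drop_eq_nil_of_le (by simp), List.append_nil]
    rw [map_range_blocks N hN]
    apply String.ext
    rw [PySem.Str.toList_join]
    have hsep : ("\n" : String).toList = ['\n'] := rfl
    rw [hsep, PySem.List.slice_to_neg_one, join_newline_eq]
    have hmul : (N * 5 : Int) = 5 * N := by ring
    have h2 : ∀ (x : List Char), List.replicate (N.toNat + N.toNat) x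
        = List.replicate N.toNat x ++ List.replicate N.toNat x := by
      intro x; rw [List.replicate_add]
    simp [PySem.List.pyRepeat, List.map_replicate, List.flatten_append, hmul, h2,
      String.toList_ofList, two_mul, List.append_assoc, -List.replicate_append_replicate]
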